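-- pv_equiv track=rewrite | github.com/facebookresearch/personal-timeline | code/create_summary_LLEntries.py | homeOrNot
-- ===== SOURCE A (Python) =====
-- HOME_CITIES = ["Los Altos", "Palo Alto", "Mountain View", "San Francisco", "Burlingame", "Milpitas", "San Jose"]
--
-- def homeOrNot(day):
--     home = 0
--     away = 0
--     cities, states, countries = [], [], []
--     for loc in day:
--
--         if loc[0] != "" and loc[0] not in cities:
--             cities.append(loc[0])
--         if loc[1] != "" and loc[1] not in states:
--             states.append(loc[1])
--         if loc[2] != "" and loc[2] not in countries:
--             countries.append(loc[2])
--
--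
--     if len(list(set(HOME_CITIES) & set(cities))) > 0:
--         home = 1
--     for country in countries:
--         if country != "United States":
--             away = 1
--     for state in states:
--         if state != "California":
--             away = 1
--     if home == 0 and away == 0:
--         return ("unknown")
--     if home == 1 and away == 0:
--         return ("home")
--     if home == 0 and away == 1:
--         return ("away")
--     return ("both")
-- ===== SOURCE B (Python) =====
-- HOME_CITIES = ["Los Altos", "Palo Alto", "Mountain View", "San Francisco", "Burlingame", "Milpitas", "San Jose"]
--
-- def homeOrNot(day):
--     home = any(loc[0] in HOME_CITIES for loc in day)
--     away = any(loc[1] not in ("", "California") or loc[2] not in ("", "United States")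
--                for loc in day)
--     if home:
--         return "both" if away else "home"
--     return "away" if away else "unknown"
-- ===== Notes on version B (the rewrite author's own statement) =====
-- stated objective: simpler
-- what changed: Drops A's three deduplicated accumulator lists and its set-intersection/flag loops: B computes the two booleans home/away by a single any() reduction over the day and picks the answer with a nested conditional.
import Mathlib
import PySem

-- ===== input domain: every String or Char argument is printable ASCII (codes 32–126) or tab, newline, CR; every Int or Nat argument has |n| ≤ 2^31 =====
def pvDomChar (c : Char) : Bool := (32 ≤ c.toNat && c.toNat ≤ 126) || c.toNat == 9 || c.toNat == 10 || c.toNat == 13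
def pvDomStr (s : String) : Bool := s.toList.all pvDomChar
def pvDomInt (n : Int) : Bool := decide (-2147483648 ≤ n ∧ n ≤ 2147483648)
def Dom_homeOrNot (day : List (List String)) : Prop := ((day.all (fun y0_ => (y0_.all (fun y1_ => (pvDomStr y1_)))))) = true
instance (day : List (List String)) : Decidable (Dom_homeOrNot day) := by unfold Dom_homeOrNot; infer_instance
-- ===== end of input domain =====

-- B replaces A's build-dedup-lists-then-scan structure by two direct any-reductions over the day
-- and a nested conditional on the (home, away) pair; objective: simpler.

-- ===== PORT A =====
def pvHomeCities : List String :=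
  ["Los Altos", "Palo Alto", "Mountain View", "San Francisco", "Burlingame", "Milpitas", "San Jose"]

def pvStepA (acc : List String × List String × List String) (loc : List String) :
    List String × List String × List String :=
  let c0 := PySem.List.pyGetD loc 0 ""
  let c1 := PySem.List.pyGetD loc 1 ""
  let c2 := PySem.List.pyGetD loc 2 ""
  let cities := if c0 ≠ "" ∧ c0 ∉ acc.1 then acc.1 ++ [c0] else acc.1
  let states := if c1 ≠ "" ∧ c1 ∉ acc.2.1 then acc.2.1 ++ [c1] else acc.2.1
  let countries := if c2 ≠ "" ∧ c2 ∉ acc.2.2 then acc.2.2 ++ [c2] else acc.2.2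
  (cities, states, countries)

def homeOrNot (day : List (List String)) : String :=
  let acc := day.foldl pvStepA ([], [], [])
  let home : Int :=
    if 0 < (PySem.Set.inter (PySem.Set.ofList pvHomeCities) (PySem.Set.ofList acc.1)).length
    then 1 else 0
  let away : Int := acc.2.2.foldl (fun a country => if country ≠ "United States" then 1 else a) 0
  let away := acc.2.1.foldl (fun a st => if st ≠ "California" then 1 else a) away
  if home = 0 ∧ away = 0 then "unknown"
  else if home = 1 ∧ away = 0 then "home"
  else if home = 0 ∧ away = 1 then "away"
  else "both"

-- ===== PORT B ===== (shares the HOME_CITIES constant pvHomeCities with A's port)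
def pvHomeHit (loc : List String) : Bool := pvHomeCities.contains (PySem.List.pyGetD loc 0 "")

def pvAwayHit (loc : List String) : Bool :=
  (decide (PySem.List.pyGetD loc 1 "" ≠ "" ∧ PySem.List.pyGetD loc 1 "" ≠ "California")) ||
  (decide (PySem.List.pyGetD loc 2 "" ≠ "" ∧ PySem.List.pyGetD loc 2 "" ≠ "United States"))

def homeOrNot_alt (day : List (List String)) : String :=
  let home := day.any pvHomeHit
  let away := day.any pvAwayHit
  if home then (if away then "both" else "home")
  else (if away then "away" else "unknown")

-- ===== PRECONDITION & SPEC =====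
-- A indexes loc[0], loc[1], loc[2] unconditionally, so any location list shorter than 3 raises
-- IndexError; Pre_ admits exactly the inputs where every location has at least 3 fields.
def Pre_homeOrNot (day : List (List String)) : Prop := ∀ loc ∈ day, 3 ≤ loc.length
instance (day : List (List String)) : Decidable (Pre_homeOrNot day) := by unfold Pre_homeOrNot; infer_instance

def pvWitness_homeOrNot : List (List String) := [["San Jose", "California", "United States"], ["", "Nevada", ""]]

def Spec_homeOrNot (day : List (List String)) (out : String) : Prop := out = homeOrNot_alt day
instance (day : List (List String)) (out : String) : Decidable (Spec_homeOrNot day out) := by unfold Spec_homeOrNot; infer_instance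

-- ===== CLAIM (what is proved, stated in full; the proofs are below) =====
def Claim_equal_homeOrNot : Prop := ∀ (day : List (List String)), Dom_homeOrNot day → Pre_homeOrNot day → Spec_homeOrNot day (homeOrNot day)

-- ===== LEMMAS AND PROOFS =====

-- membership in the three deduplicated lists A's first loop builds
theorem pv_mem_fold1 (day : List (List String)) (c s co : List String) (x : String) :
    x ∈ (day.foldl pvStepA (c, s, co)).1 ↔
      x ∈ c ∨ (x ≠ "" ∧ ∃ loc ∈ day, PySem.List.pyGetD loc 0 "" = x) := by
  induction day generalizing c s co with
  | nil => simp
  | cons loc rest ih =>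
      simp only [List.foldl_cons, pvStepA, ih]
      split_ifs with h1 <;> simp only [List.mem_append, List.mem_cons] <;> aesop

theorem pv_mem_fold2 (day : List (List String)) (c s co : List String) (x : String) :
    x ∈ (day.foldl pvStepA (c, s, co)).2.1 ↔
      x ∈ s ∨ (x ≠ "" ∧ ∃ loc ∈ day, PySem.List.pyGetD loc 1 "" = x) := by
  induction day generalizing c s co with
  | nil => simp
  | cons loc rest ih =>
      simp only [List.foldl_cons, pvStepA, ih]
      split_ifs with h1 <;> simp only [List.mem_append, List.mem_cons] <;> aesop

theorem pv_mem_fold3 (day : List (List String)) (c s co : List String) (x : String) :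
    x ∈ (day.foldl pvStepA (c, s, co)).2.2 ↔
      x ∈ co ∨ (x ≠ "" ∧ ∃ loc ∈ day, PySem.List.pyGetD loc 2 "" = x) := by
  induction day generalizing c s co with
  | nil => simp
  | cons loc rest ih =>
      simp only [List.foldl_cons, pvStepA, ih]
      split_ifs with h1 <;> simp only [List.mem_append, List.mem_cons] <;> aesop

-- A's flag loop: fold over l sets the flag iff some element differs from k
theorem pv_flag_fold (l : List String) (k : String) (a : Int) :
    l.foldl (fun a x => if x ≠ k then 1 else a) a
      = if ∃ x ∈ l, x ≠ k then 1 else a := by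
  induction l generalizing a with
  | nil => simp
  | cons y rest ih =>
      rw [List.foldl_cons]
      by_cases h : y ≠ k
      · rw [if_pos h, ih]
        have hc : ∃ x ∈ y :: rest, x ≠ k := ⟨y, List.mem_cons_self, h⟩
        rw [if_pos hc]
        split_ifs <;> rfl
      · push Not at h
        rw [if_neg (by simp [h]), ih]
        have he : (∃ x ∈ y :: rest, x ≠ k) ↔ (∃ x ∈ rest, x ≠ k) := by
          simp only [List.mem_cons]
          constructor
          · rintro ⟨x, hx | hx, hk⟩
            · exact absurd (hx.trans h) hk
            · exact ⟨x, hx, hk⟩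
          · rintro ⟨x, hx, hk⟩
            exact ⟨x, Or.inr hx, hk⟩
        simp only [he]

-- ===== VERDICT (by name: the statement is the Claim_ definition above) =====
theorem homeOrNot_spec : Claim_equal_homeOrNot := by
  intro day _ _
  unfold Spec_homeOrNot homeOrNot homeOrNot_alt
  simp only [pv_flag_fold]
  have hhome : (0 < (PySem.Set.inter (PySem.Set.ofList pvHomeCities)
        (PySem.Set.ofList (day.foldl pvStepA ([], [], [])).1)).length)
      ↔ day.any pvHomeHit = true := by
    rw [List.length_pos_iff]
    rw [← List.isEmpty_eq_false_iff, List.isEmpty_eq_false_iff_exists_mem]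
    simp only [PySem.Set.mem_inter, PySem.Set.mem_ofList, pv_mem_fold1, List.any_eq_true,
      pvHomeHit, List.contains_iff_mem, List.not_mem_nil, false_or]
    constructor
    · rintro ⟨x, hx, -, hloc⟩
      obtain ⟨loc, hm, he⟩ := hloc
      exact ⟨loc, hm, by rw [he]; exact hx⟩
    · rintro ⟨loc, hm, hx⟩
      refine ⟨PySem.List.pyGetD loc 0 "", hx, ?_, ⟨loc, hm, rfl⟩⟩
      intro he; rw [he] at hx; revert hx; simp [pvHomeCities]
  have haway : ((∃ x ∈ (day.foldl pvStepA ([], [], [])).2.2, x ≠ "United States") ∨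
        (∃ x ∈ (day.foldl pvStepA ([], [], [])).2.1, x ≠ "California"))
      ↔ day.any pvAwayHit = true := by
    simp only [pv_mem_fold2, pv_mem_fold3, List.any_eq_true, pvAwayHit, List.not_mem_nil,
      false_or, Bool.or_eq_true, decide_eq_true_eq]
    constructor
    · rintro (⟨x, ⟨hne, loc, hm, he⟩, hk⟩ | ⟨x, ⟨hne, loc, hm, he⟩, hk⟩)
      · exact ⟨loc, hm, Or.inr ⟨by rw [he]; exact hne, by rw [he]; exact hk⟩⟩
      · exact ⟨loc, hm, Or.inl ⟨by rw [he]; exact hne, by rw [he]; exact hk⟩⟩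
    · rintro ⟨loc, hm, (⟨h1, h2⟩ | ⟨h1, h2⟩)⟩
      · exact Or.inr ⟨_, ⟨h1, loc, hm, rfl⟩, h2⟩
      · exact Or.inl ⟨_, ⟨h1, loc, hm, rfl⟩, h2⟩
  by_cases hP : 0 < (PySem.Set.inter (PySem.Set.ofList pvHomeCities)
        (PySem.Set.ofList (day.foldl pvStepA ([], [], [])).1)).length <;>
  by_cases hQ1 : ∃ x ∈ (day.foldl pvStepA ([], [], [])).2.1, x ≠ "California" <;>
  by_cases hQ2 : ∃ x ∈ (day.foldl pvStepA ([], [], [])).2.2, x ≠ "United States" <;>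
  · have HB := hhome
    have WB := haway
    simp only [hP, hQ1, hQ2, true_iff, or_false, or_true, iff_false, false_iff,
      not_or] at HB WB
    simp [hP, hQ1, hQ2, HB, WB]
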